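-- pv_equiv track=rewrite | github.com/wangzizhe/GateForge | gateforge/agent_modelica_next_harder_lane_v0_3_4.py | _select_family_id
-- ===== SOURCE A (Python) =====
-- def _norm(value: object) -> str:
--     return str(value or "").strip()
--
-- def _lane_rows(payload: dict) -> list[dict]:
--     rows = payload.get("lane_rows")
--     if isinstance(rows, list):
--         return [row for row in rows if isinstance(row, dict)]
--     return []
--
-- def _select_family_id(lane_gate_summary: dict, requested_family_id: str) -> str:
--     if _norm(requested_family_id):
--         return _norm(requested_family_id)
--     ready_rows = [row for row in _lane_rows(lane_gate_summary) if _norm(row.get("status")) == "FREEZE_READY"]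
--     if not ready_rows:
--         return ""
--     top = max(
--         ready_rows,
--         key=lambda row: (int(row.get("freeze_ready_count") or 0), _norm(row.get("family_id"))),
--     )
--     return _norm(top.get("family_id"))
-- ===== SOURCE B (Python) =====
-- def _norm(value: object) -> str:
--     return str(value or "").strip()
--
-- def _lane_rows(payload: dict) -> list[dict]:
--     rows = payload.get("lane_rows")
--     if isinstance(rows, list):
--         return [row for row in rows if isinstance(row, dict)]
--     return []
--
-- def _select_family_id(lane_gate_summary: dict, requested_family_id: str) -> str:
--     req = _norm(requested_family_id)
--     if req:
--         return req
--     ready_rows = [row for row in _lane_rows(lane_gate_summary) if _norm(row.get("status")) == "FREEZE_READY"]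
--     ranked = sorted(
--         ready_rows,
--         key=lambda row: (int(row.get("freeze_ready_count") or 0), _norm(row.get("family_id"))),
--         reverse=True,
--     )
--     if not ranked:
--         return ""
--     return _norm(ranked[0].get("family_id"))
-- ===== Notes on version B (the rewrite author's own statement) =====
-- stated objective: alternative
-- what changed: A takes the maximum of the FREEZE_READY rows with a single max() scan; B ranks the FREEZE_READY rows with a stable descending sort on the same (count, family_id) key and returns the top-ranked row's family_id. Pre_ excludes only inputs where A raises ValueError (a blank requested id with a FREEZE_READY row whose non-empty freeze_ready_count string is not int()-parseable); B raises there too.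
import Mathlib
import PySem

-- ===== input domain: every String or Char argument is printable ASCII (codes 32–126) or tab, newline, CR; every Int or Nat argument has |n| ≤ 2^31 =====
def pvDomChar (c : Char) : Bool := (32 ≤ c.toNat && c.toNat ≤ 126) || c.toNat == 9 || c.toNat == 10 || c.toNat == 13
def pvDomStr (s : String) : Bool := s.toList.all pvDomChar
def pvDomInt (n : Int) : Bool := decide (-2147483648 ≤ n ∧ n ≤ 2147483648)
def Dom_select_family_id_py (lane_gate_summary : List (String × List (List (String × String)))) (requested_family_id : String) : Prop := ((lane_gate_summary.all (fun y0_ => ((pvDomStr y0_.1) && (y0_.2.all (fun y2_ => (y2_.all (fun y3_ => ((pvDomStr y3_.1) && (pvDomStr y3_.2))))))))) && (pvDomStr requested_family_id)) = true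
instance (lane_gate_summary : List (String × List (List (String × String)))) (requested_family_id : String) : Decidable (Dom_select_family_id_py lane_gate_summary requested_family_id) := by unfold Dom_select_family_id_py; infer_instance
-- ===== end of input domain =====

-- B replaces A's single max() scan over the ready rows by a stable descending
-- sort on the same (count, family_id) key followed by taking the top row
-- (objective: alternative ranking-based decomposition).

-- ===== shared helpers (used by both ports) =====

-- _norm(value) = str(value or "").strip(); for an Option String argument
-- 'value or ""' is getD "" (None → "" and "" → "" coincide)
def pvNorm (v : Option String) : String := PySem.Str.strip (v.getD "")

-- dict.get with first-match semantics on the association list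
def pvLookup (row : List (String × String)) (k : String) : Option String :=
  (row.find? (fun p => p.1 == k)).map (·.2)

-- _lane_rows: payload.get("lane_rows") or [] if absent; the isinstance checks
-- are trivially true under the typed representation
def pvLaneRows (payload : List (String × List (List (String × String)))) : List (List (String × String)) :=
  ((payload.find? (fun p => p.1 == "lane_rows")).map (·.2)).getD []

-- int(row.get("freeze_ready_count") or 0); none = ValueError (excluded by Pre_)
def pvCount? (row : List (String × String)) : Option Int :=
  match pvLookup row "freeze_ready_count" with
  | none => some 0
  | some s => if s = "" then some 0 else PySem.Int.ofStr? s

-- the comparison key (int(... or 0), _norm(family_id)); the '.getD 0' is only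
-- reached outside Pre_ (where the Python raises ValueError)
def pvKey (row : List (String × String)) : Int × String :=
  ((pvCount? row).getD 0, pvNorm (pvLookup row "family_id"))

-- Python tuple '<' (lexicographic) on (int, str)
def pvKeyLt (a b : Int × String) : Bool :=
  decide (a.1 < b.1 ∨ (a.1 = b.1 ∧ a.2 < b.2))

-- ===== PORT A =====

def select_family_id_py (lane_gate_summary : List (String × List (List (String × String)))) (requested_family_id : String) : String :=
  if pvNorm (some requested_family_id) ≠ "" then pvNorm (some requested_family_id)
  else
    let ready_rows := (pvLaneRows lane_gate_summary).filter
      (fun row => pvNorm (pvLookup row "status") == "FREEZE_READY")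
    match ready_rows with
    | [] => ""
    | r :: rest =>
      -- max(ready_rows, key=…): keep the current best, replace on strictly greater
      let top := rest.foldl (fun best row => if pvKeyLt (pvKey best) (pvKey row) then row else best) r
      pvNorm (pvLookup top "family_id")

-- ===== PORT B =====

def select_family_id_py_alt (lane_gate_summary : List (String × List (List (String × String)))) (requested_family_id : String) : String :=
  let req := pvNorm (some requested_family_id)
  if req ≠ "" then req
  else
    let ready_rows := (pvLaneRows lane_gate_summary).filter
      (fun row => pvNorm (pvLookup row "status") == "FREEZE_READY")
    -- sorted(ready_rows, key=lambda row: (int(... or 0), _norm(family_id)), reverse=True)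
    let ranked := PySem.List.sorted2 ready_rows
      (fun row => (pvCount? row).getD 0)
      (fun row => pvNorm (pvLookup row "family_id")) true
    match ranked with
    | [] => ""
    | top :: _ => pvNorm (pvLookup top "family_id")

-- ===== PRECONDITION & SPEC =====
-- Pre_ excludes exactly the inputs where Python A raises ValueError: a blank
-- requested id together with some FREEZE_READY lane row whose non-empty
-- freeze_ready_count string is not int()-parseable (B raises there too).
def Pre_select_family_id_py (lane_gate_summary : List (String × List (List (String × String)))) (requested_family_id : String) : Prop :=
  pvNorm (some requested_family_id) ≠ "" ∨
    ∀ row ∈ pvLaneRows lane_gate_summary,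
      pvNorm (pvLookup row "status") = "FREEZE_READY" → (pvCount? row).isSome
instance (lane_gate_summary : List (String × List (List (String × String)))) (requested_family_id : String) : Decidable (Pre_select_family_id_py lane_gate_summary requested_family_id) := by unfold Pre_select_family_id_py; infer_instance

def pvWitness_select_family_id_py : (List (String × List (List (String × String)))) × String :=
  ([("lane_rows", [[("status", "FREEZE_READY"), ("family_id", "fam1"), ("freeze_ready_count", "2")],
                   [("status", "FREEZE_READY"), ("family_id", "fam2"), ("freeze_ready_count", "2")]])], "")

def Spec_select_family_id_py (lane_gate_summary : List (String × List (List (String × String)))) (requested_family_id : String) (out : String) : Prop := out = select_family_id_py_alt lane_gate_summary requested_family_id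
instance (lane_gate_summary : List (String × List (List (String × String)))) (requested_family_id : String) (out : String) : Decidable (Spec_select_family_id_py lane_gate_summary requested_family_id out) := by unfold Spec_select_family_id_py; infer_instance

-- ===== CLAIM (what is proved, stated in full; the proofs are below) =====
def Claim_equal_select_family_id_py : Prop := ∀ (lane_gate_summary : List (String × List (List (String × String)))) (requested_family_id : String), Dom_select_family_id_py lane_gate_summary requested_family_id → Pre_select_family_id_py lane_gate_summary requested_family_id → Spec_select_family_id_py lane_gate_summary requested_family_id (select_family_id_py lane_gate_summary requested_family_id)

-- ===== LEMMAS AND PROOFS =====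

-- the strict 'before' predicate that sorted2 (reverse=True) inserts with,
-- expressed through the lexicographic key
theorem pvBefore_eq (a b : List (String × String)) :
    (decide ((pvCount? a).getD 0 < (pvCount? b).getD 0) ||
      (!decide ((pvCount? b).getD 0 < (pvCount? a).getD 0) &&
        decide (pvNorm (pvLookup a "family_id") < pvNorm (pvLookup b "family_id"))))
      = pvKeyLt (pvKey a) (pvKey b) := by
  simp only [pvKeyLt, pvKey]
  by_cases h1 : (pvCount? a).getD 0 < (pvCount? b).getD 0
  · simp [h1]
  · by_cases h2 : (pvCount? b).getD 0 < (pvCount? a).getD 0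
    · have : (pvCount? a).getD 0 ≠ (pvCount? b).getD 0 := by omega
      simp [this]
      intro hle _
      omega
    · have : (pvCount? a).getD 0 = (pvCount? b).getD 0 := by omega
      simp [this]

-- head of an insertion-sort fold started at a nonempty accumulator: the running
-- maximum under 'before' (leftmost on ties, since equal keys insert behind)
theorem pvHead_foldl_insertBy {α : Type} (before : α → α → Bool)
    (xs : List α) (y : α) (ys : List α) :
    ∃ t, List.foldl (fun acc x => PySem.List.insertBy before x acc) (y :: ys) xs
      = (xs.foldl (fun a x => if before x a then x else a) y) :: t := by
  induction xs generalizing y ys with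
  | nil => exact ⟨ys, rfl⟩
  | cons x xs ih =>
    simp only [List.foldl_cons, PySem.List.insertBy]
    by_cases h : before x y = true
    · simp only [h, if_true]
      exact ih x (y :: ys)
    · simp only [h, if_false, Bool.false_eq_true]
      exact ih y (PySem.List.insertBy before x ys)

-- ===== VERDICT (by name: the statement is the Claim_ definition above) =====
theorem select_family_id_py_spec : Claim_equal_select_family_id_py := by
  intro lg req _ _
  unfold Spec_select_family_id_py select_family_id_py select_family_id_py_alt
  by_cases hreq : pvNorm (some req) = ""
  · rw [if_neg (by simp [hreq]), if_neg (by simp [hreq])]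
    cases hready : (pvLaneRows lg).filter (fun row => pvNorm (pvLookup row "status") == "FREEZE_READY") with
    | nil => simp [PySem.List.sorted2]
    | cons r rest =>
      simp only [PySem.List.sorted2, List.foldl_cons, PySem.List.insertBy, reduceIte]
      obtain ⟨t, ht⟩ := pvHead_foldl_insertBy
        (fun a b => decide ((pvCount? b).getD 0 < (pvCount? a).getD 0) ||
          (!decide ((pvCount? a).getD 0 < (pvCount? b).getD 0) &&
            decide (pvNorm (pvLookup b "family_id") < pvNorm (pvLookup a "family_id"))))
        rest r []
      rw [ht]
      simp only [pvBefore_eq]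
  · rw [if_pos hreq, if_pos hreq]
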